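-- pv_equiv track=rewrite | github.com/ZigmaSoftware/mdkcampaign-backend | campaign_os/telecalling/workflow.py | _resolve_cross_status
-- ===== SOURCE A (Python) =====
-- from typing import Dict, Iterable
--
-- def _resolve_cross_status(contact_keys: set[str], assignment_lookup: Dict[str, dict], surveyed_keys: set[str]):
--     fallback_info = None
--     for key in contact_keys:
--         assignment_info = assignment_lookup.get(key)
--         if not assignment_info:
--             continue
--         if key in surveyed_keys:
--             return 'already_contacted', assignment_info
--         if fallback_info is None:
--             fallback_info = assignment_info
--     if fallback_info:
--         return 'already_assigned', fallback_info
--     return '', None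
-- ===== SOURCE B (Python) =====
-- def _resolve_cross_status(contact_keys, assignment_lookup, surveyed_keys):
--     def first_hit(pred):
--         return next((k for k in contact_keys
--                      if assignment_lookup.get(k) and pred(k)), None)
--     key = first_hit(lambda k: k in surveyed_keys)
--     if key is not None:
--         return 'already_contacted', assignment_lookup[key]
--     key = first_hit(lambda k: True)
--     if key is not None:
--         return 'already_assigned', assignment_lookup[key]
--     return '', None
-- ===== Notes on version B (the rewrite author's own statement) =====
-- stated objective: simpler
-- what changed: Replaced the single stateful loop with a fallback accumulator by two stateless passes (next over a generator): first pass finds a truthy assignment whose key is surveyed, second pass finds any truthy assignment.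
import Mathlib
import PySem

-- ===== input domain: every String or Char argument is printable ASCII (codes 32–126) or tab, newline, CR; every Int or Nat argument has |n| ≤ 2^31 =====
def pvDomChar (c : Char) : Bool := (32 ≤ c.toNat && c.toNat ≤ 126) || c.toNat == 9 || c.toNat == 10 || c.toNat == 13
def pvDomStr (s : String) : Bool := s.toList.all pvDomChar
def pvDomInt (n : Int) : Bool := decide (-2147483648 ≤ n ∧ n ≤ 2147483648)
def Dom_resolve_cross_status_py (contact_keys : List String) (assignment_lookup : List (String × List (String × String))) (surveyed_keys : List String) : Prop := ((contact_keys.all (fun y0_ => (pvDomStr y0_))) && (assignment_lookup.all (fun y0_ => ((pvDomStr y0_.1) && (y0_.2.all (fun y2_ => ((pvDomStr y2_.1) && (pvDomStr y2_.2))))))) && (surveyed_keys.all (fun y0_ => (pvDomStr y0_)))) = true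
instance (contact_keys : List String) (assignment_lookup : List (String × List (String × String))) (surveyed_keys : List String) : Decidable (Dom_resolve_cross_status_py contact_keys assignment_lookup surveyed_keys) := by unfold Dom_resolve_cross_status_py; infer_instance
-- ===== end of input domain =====

-- ===== PORT A =====
-- B replaces A's stateful loop (fallback accumulator) by two stateless find-first passes; same O(n) cost, simpler.
-- dict.get(key): first-match lookup in the association list
def rcsGet (assignment_lookup : List (String × List (String × String))) (key : String) : Option (List (String × String)) :=
  match assignment_lookup with
  | [] => none
  | (k, v) :: rest => if k = key then some v else rcsGet rest key

-- A's loop over contact_keys with the fallback_info accumulator, branch for branch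
def rcsA_loop (assignment_lookup : List (String × List (String × String))) (surveyed_keys : List String) :
    List String → Option (List (String × String)) → String × (Option (List (String × String)))
  | [], fallback_info =>
      match fallback_info with
      | some v => if v ≠ [] then ("already_assigned", some v) else ("", none)
      | none => ("", none)
  | key :: rest, fallback_info =>
      match rcsGet assignment_lookup key with
      | none => rcsA_loop assignment_lookup surveyed_keys rest fallback_info
      | some info =>
        if info = [] then rcsA_loop assignment_lookup surveyed_keys rest fallback_info
        else if surveyed_keys.contains key then ("already_contacted", some info)
        else match fallback_info with
          | none => rcsA_loop assignment_lookup surveyed_keys rest (some info)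
          | some _ => rcsA_loop assignment_lookup surveyed_keys rest fallback_info

def resolve_cross_status_py (contact_keys : List String) (assignment_lookup : List (String × List (String × String))) (surveyed_keys : List String) : String × (Option (List (String × String))) :=
  rcsA_loop assignment_lookup surveyed_keys contact_keys none

-- ===== PORT B =====
-- truthiness of assignment_lookup.get(k): present and non-empty
def rcsTruthy (assignment_lookup : List (String × List (String × String))) (key : String) : Bool :=
  match rcsGet assignment_lookup key with
  | some v => !v.isEmpty
  | none => false

def resolve_cross_status_py_alt (contact_keys : List String) (assignment_lookup : List (String × List (String × String))) (surveyed_keys : List String) : String × (Option (List (String × String))) :=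
  match contact_keys.find? (fun k => rcsTruthy assignment_lookup k && surveyed_keys.contains k) with
  | some k => ("already_contacted", rcsGet assignment_lookup k)
  | none =>
    match contact_keys.find? (fun k => rcsTruthy assignment_lookup k) with
    | some k => ("already_assigned", rcsGet assignment_lookup k)
    | none => ("", none)

-- ===== PRECONDITION & SPEC =====
def Spec_resolve_cross_status_py (contact_keys : List String) (assignment_lookup : List (String × List (String × String))) (surveyed_keys : List String) (out : String × (Option (List (String × String)))) : Prop := out = resolve_cross_status_py_alt contact_keys assignment_lookup surveyed_keys
instance (contact_keys : List String) (assignment_lookup : List (String × List (String × String))) (surveyed_keys : List String) (out : String × (Option (List (String × String)))) : Decidable (Spec_resolve_cross_status_py contact_keys assignment_lookup surveyed_keys out) := by unfold Spec_resolve_cross_status_py; infer_instance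

-- ===== CLAIM (what is proved, stated in full; the proofs are below) =====
def Claim_equal_resolve_cross_status_py : Prop := ∀ (contact_keys : List String) (assignment_lookup : List (String × List (String × String))) (surveyed_keys : List String), Dom_resolve_cross_status_py contact_keys assignment_lookup surveyed_keys → Spec_resolve_cross_status_py contact_keys assignment_lookup surveyed_keys (resolve_cross_status_py contact_keys assignment_lookup surveyed_keys)

-- ===== LEMMAS AND PROOFS =====
lemma rcsA_loop_eq (al : List (String × List (String × String))) (sk : List String) :
    ∀ (ks : List String) (fb : Option (List (String × String))),
    (∀ v, fb = some v → v ≠ []) →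
    rcsA_loop al sk ks fb =
      match ks.find? (fun k => rcsTruthy al k && sk.contains k) with
      | some k => ("already_contacted", rcsGet al k)
      | none =>
        match fb with
        | some v => ("already_assigned", some v)
        | none =>
          match ks.find? (fun k => rcsTruthy al k) with
          | some k => ("already_assigned", rcsGet al k)
          | none => ("", none) := by
  intro ks
  induction ks with
  | nil =>
    intro fb hfb
    cases fb with
    | none => simp [rcsA_loop]
    | some v => simp [rcsA_loop, hfb v rfl]
  | cons k rest ih =>
    intro fb hfb
    simp only [rcsA_loop, List.find?]
    cases hg : rcsGet al k with
    | none =>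
      have ht : rcsTruthy al k = false := by simp [rcsTruthy, hg]
      simp only [ht, Bool.false_and, ih fb hfb]
    | some info =>
      by_cases hi : info = []
      · have ht : rcsTruthy al k = false := by simp [rcsTruthy, hg, hi]
        simp only [if_pos hi, ih fb hfb]
        simp [ht]
      · have ht : rcsTruthy al k = true := by simp [rcsTruthy, hg, hi]
        by_cases hs : k ∈ sk
        · simp [hi, ht, hs, hg]
        · simp only [hi, if_false, ht, hs, List.contains_eq_mem, decide_false,
            Bool.and_false, if_false, if_neg hs, Bool.true_and]

          cases fb with
          | none =>
            rw [ih (some info) (by intro v hv; cases hv; exact hi)]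
            simp only [List.contains_eq_mem]
            cases rest.find? (fun k => rcsTruthy al k && decide (k ∈ sk)) <;> simp [hg]
          | some w =>
            rw [ih (some w) hfb]
            simp only [List.contains_eq_mem]
            simp

-- ===== VERDICT (by name: the statement is the Claim_ definition above) =====
theorem resolve_cross_status_py_spec : Claim_equal_resolve_cross_status_py := by
  intro ck al sk _
  unfold Spec_resolve_cross_status_py resolve_cross_status_py resolve_cross_status_py_alt
  rw [rcsA_loop_eq al sk ck none (by intro v h; cases h)]
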